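-- pv_equiv track=rewrite | github.com/petscop02/Skript-jezici | other_functions.py | check_password_characters
-- ===== SOURCE A (Python) =====
-- def check_password_characters(psw):
--     count1 = 0
--     count2 = 0
--     count3 = 0
--     count4 = 0
--     lower = ['a','b','c','d','e','f','g','h','i','j','k','l','m','n','o','p','q','r','s','t','u','v','w','x','y','z']
--     upper = ['A','B','C','D','E','F','G','H','I','J','K','L','M','N','O','P','Q','R','S','T','U','V','W','X','Y','Z']
--     numb = ['0','1','2','3','4','5','6','7','8','9']
--     for i in psw:
--         if i in lower:
--             count1 += 1
--         elif i in upper: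
--             count2 += 1
--         elif i in numb:
--             count3 += 1
--         else:
--             count4 += 1
--     if count1 == 0 or count2 == 0 or count3 == 0 or count4 == 0:
--         return True
-- ===== SOURCE B (Python) =====
-- def check_password_characters(psw):
--     lower = 'abcdefghijklmnopqrstuvwxyz'
--     upper = 'ABCDEFGHIJKLMNOPQRSTUVWXYZ'
--     numb = '0123456789'
--     has_lower = any(c in lower for c in psw)
--     has_upper = any(c in upper for c in psw)
--     has_numb = any(c in numb for c in psw)
--     has_other = any(c not in lower and c not in upper and c not in numb for c in psw)
--     if not (has_lower and has_upper and has_numb and has_other):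
--         return True
-- ===== Notes on version B (the rewrite author's own statement) =====
-- stated objective: idiomatic
-- what changed: Replaced the four-counter counting loop with an if/elif chain by four independent short-circuiting any() presence checks over the ASCII category sets, returning True when not all four categories are present.
import Mathlib
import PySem

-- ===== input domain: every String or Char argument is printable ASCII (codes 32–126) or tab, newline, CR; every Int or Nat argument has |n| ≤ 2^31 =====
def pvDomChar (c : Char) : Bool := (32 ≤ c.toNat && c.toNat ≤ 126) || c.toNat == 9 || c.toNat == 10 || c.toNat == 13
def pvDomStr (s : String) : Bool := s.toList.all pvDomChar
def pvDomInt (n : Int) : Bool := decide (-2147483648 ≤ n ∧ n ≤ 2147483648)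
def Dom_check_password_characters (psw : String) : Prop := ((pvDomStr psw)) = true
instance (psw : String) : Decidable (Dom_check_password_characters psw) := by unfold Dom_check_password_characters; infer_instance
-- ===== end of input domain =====

-- B replaces A's four-counter if/elif counting loop by four independent any() presence checks (idiomatic decomposition, same cost).

-- ===== PORT A =====
-- A's literal category lists
def pvLowerList : List Char := ['a','b','c','d','e','f','g','h','i','j','k','l','m','n','o','p','q','r','s','t','u','v','w','x','y','z']
def pvUpperList : List Char := ['A','B','C','D','E','F','G','H','I','J','K','L','M','N','O','P','Q','R','S','T','U','V','W','X','Y','Z']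
def pvNumbList : List Char := ['0','1','2','3','4','5','6','7','8','9']

-- the body of A's for-loop
def pvStep (s : Int × Int × Int × Int) (i : Char) : Int × Int × Int × Int :=
  if pvLowerList.contains i then (s.1 + 1, s.2.1, s.2.2.1, s.2.2.2)
  else if pvUpperList.contains i then (s.1, s.2.1 + 1, s.2.2.1, s.2.2.2)
  else if pvNumbList.contains i then (s.1, s.2.1, s.2.2.1 + 1, s.2.2.2)
  else (s.1, s.2.1, s.2.2.1, s.2.2.2 + 1)

def check_password_characters (psw : String) : Option Bool :=
  let r := psw.toList.foldl pvStep (0, 0, 0, 0)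
  if r.1 = 0 ∨ r.2.1 = 0 ∨ r.2.2.1 = 0 ∨ r.2.2.2 = 0 then some true else none

-- ===== PORT B =====
def check_password_characters_alt (psw : String) : Option Bool :=
  let l := psw.toList
  let hasLower := l.any (fun c => pvLowerList.contains c)
  let hasUpper := l.any (fun c => pvUpperList.contains c)
  let hasNumb := l.any (fun c => pvNumbList.contains c)
  let hasOther := l.any (fun c => !pvLowerList.contains c && !pvUpperList.contains c && !pvNumbList.contains c)
  if !(hasLower && hasUpper && hasNumb && hasOther) then some true else none

-- ===== PRECONDITION & SPEC =====
def Spec_check_password_characters (psw : String) (out : Option Bool) : Prop := out = check_password_characters_alt psw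
instance (psw : String) (out : Option Bool) : Decidable (Spec_check_password_characters psw out) := by unfold Spec_check_password_characters; infer_instance

-- ===== CLAIM (what is proved, stated in full; the proofs are below) =====
def Claim_equal_check_password_characters : Prop := ∀ (psw : String), Dom_check_password_characters psw → Spec_check_password_characters psw (check_password_characters psw)

-- ===== LEMMAS AND PROOFS =====

lemma pvFold_eq (l : List Char) (a b c d : Int) :
    l.foldl pvStep (a, b, c, d) =
      (a + l.countP (fun c => pvLowerList.contains c),
       b + l.countP (fun c => !pvLowerList.contains c && pvUpperList.contains c),
       c + l.countP (fun c => !pvLowerList.contains c && !pvUpperList.contains c && pvNumbList.contains c),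
       d + l.countP (fun c => !pvLowerList.contains c && !pvUpperList.contains c && !pvNumbList.contains c)) := by
  induction l generalizing a b c d with
  | nil => simp
  | cons x xs ih =>
    simp only [List.foldl_cons, List.countP_cons, pvStep]
    split_ifs with h1 h2 h3 <;>
      simp_all [Prod.ext_iff] <;> omega

lemma pv_up_not_low (c : Char) (h : pvUpperList.contains c = true) :
    pvLowerList.contains c = false := by
  rw [List.contains_eq_mem] at h
  simp only [decide_eq_true_eq] at h
  fin_cases h <;> decide

lemma pv_nm_not_low (c : Char) (h : pvNumbList.contains c = true) :
    pvLowerList.contains c = false := by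
  rw [List.contains_eq_mem] at h
  simp only [decide_eq_true_eq] at h
  fin_cases h <;> decide

lemma pv_nm_not_up (c : Char) (h : pvNumbList.contains c = true) :
    pvUpperList.contains c = false := by
  rw [List.contains_eq_mem] at h
  simp only [decide_eq_true_eq] at h
  fin_cases h <;> decide

-- the elif-guards collapse to plain category membership (the categories are disjoint)
lemma pv_q2_eq (c : Char) :
    (!pvLowerList.contains c && pvUpperList.contains c) = pvUpperList.contains c := by
  cases h : pvUpperList.contains c
  · simp
  · rw [pv_up_not_low c h]; rfl

lemma pv_q3_eq (c : Char) :
    (!pvLowerList.contains c && (!pvUpperList.contains c && pvNumbList.contains c)) = pvNumbList.contains c := by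
  cases h : pvNumbList.contains c
  · simp
  · rw [pv_nm_not_low c h, pv_nm_not_up c h]; rfl

lemma pv_cz (l : List Char) (p : Char → Bool) : ((l.countP p : Int) = 0) ↔ l.any p = false := by
  rw [Int.natCast_eq_zero, List.countP_eq_zero, List.any_eq_false]

theorem check_password_characters_spec : Claim_equal_check_password_characters := by
  intro psw _
  unfold Spec_check_password_characters check_password_characters check_password_characters_alt
  simp only [pvFold_eq, zero_add, Bool.and_assoc]
  have e2 : (fun c => !pvLowerList.contains c && (!pvUpperList.contains c && pvNumbList.contains c))
      = (fun c => pvNumbList.contains c) := funext pv_q3_eq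
  have e1 : (fun c => !pvLowerList.contains c && pvUpperList.contains c)
      = (fun c => pvUpperList.contains c) := funext pv_q2_eq
  rw [show (fun c => !pvLowerList.contains c && pvUpperList.contains c)
      = (fun c => pvUpperList.contains c) from e1,
     show (fun c => !pvLowerList.contains c && (!pvUpperList.contains c && pvNumbList.contains c))
      = (fun c => pvNumbList.contains c) from e2]
  refine if_congr ?_ rfl rfl
  rw [pv_cz, pv_cz, pv_cz, pv_cz]
  cases psw.toList.any (fun c => pvLowerList.contains c) <;>
    cases psw.toList.any (fun c => pvUpperList.contains c) <;>
    cases psw.toList.any (fun c => pvNumbList.contains c) <;>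
    cases psw.toList.any (fun c => !pvLowerList.contains c && (!pvUpperList.contains c && !pvNumbList.contains c)) <;>
    simp
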